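-- pv_equiv track=rewrite | github.com/Matt-G301/SDM-primer-design-tool | src/SDM_primer_design_tool.py | find_lowercase_range
-- ===== SOURCE A (Python) =====
-- def find_lowercase_range(s):
--     start = None
--     for i, c in enumerate(s):
--         if c.islower() and start is None:
--             start = i
--         if c.isupper() and start is not None:
--             return start, i
--     if start is not None:
--         return start, len(s)
--     return None, None
-- ===== SOURCE B (Python) =====
-- def find_lowercase_range(s):
--     best = None
--     first_upper = len(s)
--     i = len(s)
--     for c in reversed(s):
--         i -= 1
--         if c.isupper():
--             first_upper = i
--         elif c.islower():
--             best = (i, first_upper)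
--     return best if best is not None else (None, None)
-- ===== Notes on version B (the rewrite author's own statement) =====
-- stated objective: alternative
-- what changed: Replaces A's forward scan with an early return and a mutable start flag by a single right-to-left pass that carries the index of the first uppercase character seen so far and overwrites the candidate range at every lowercase character, so the final overwrite is the answer and no early exit or start flag is needed.
import Mathlib
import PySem

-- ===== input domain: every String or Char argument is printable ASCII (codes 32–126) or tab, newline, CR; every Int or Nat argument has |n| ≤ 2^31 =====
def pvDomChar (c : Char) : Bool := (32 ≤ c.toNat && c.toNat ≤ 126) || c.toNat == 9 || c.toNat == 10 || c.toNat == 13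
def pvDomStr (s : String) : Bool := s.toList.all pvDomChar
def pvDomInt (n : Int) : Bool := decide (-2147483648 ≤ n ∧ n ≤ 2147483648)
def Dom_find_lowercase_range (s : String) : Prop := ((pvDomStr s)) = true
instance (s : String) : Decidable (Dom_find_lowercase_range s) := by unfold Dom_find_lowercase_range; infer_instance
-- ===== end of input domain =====

-- B replaces A's forward scan (mutable start flag, mid-loop early return) by one right-to-left
-- pass carrying the first-uppercase index seen so far; alternative decomposition, same O(n) cost.

-- ===== PORT A =====
-- A's for-loop over enumerate(s) carrying the mutable `start` and returning early on an uppercase char.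
def pvGoA : List Char → Int → Int → Option Int → Option Int × Option Int
  | [], len, _, start =>
    match start with
    | some st => (some st, some len)
    | none => (none, none)
  | c :: rest, len, i, start =>
    let start1 := if PySem.Chars.islower c && start.isNone then some i else start
    if PySem.Chars.isupper c && start1.isSome then (start1, some i)
    else pvGoA rest len (i + 1) start1

def find_lowercase_range (s : String) : Option Int × Option Int :=
  pvGoA s.toList (PySem.Str.len s) 0 none

-- ===== PORT B =====
-- B's loop body over reversed(s): state = (best, first_upper, i).
def pvStepB (st : Option (Int × Int) × Int × Int) (c : Char) : Option (Int × Int) × Int × Int :=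
  let i := st.2.2 - 1
  if PySem.Chars.isupper c then (st.1, i, i)
  else if PySem.Chars.islower c then (some (i, st.2.1), st.2.1, i)
  else (st.1, st.2.1, i)

def find_lowercase_range_alt (s : String) : Option Int × Option Int :=
  match (s.toList.reverse.foldl pvStepB (none, PySem.Str.len s, PySem.Str.len s)).1 with
  | none => (none, none)
  | some (a, b) => (some a, some b)

-- ===== PRECONDITION & SPEC =====
def Spec_find_lowercase_range (s : String) (out : Option Int × Option Int) : Prop := out = find_lowercase_range_alt s
instance (s : String) (out : Option Int × Option Int) : Decidable (Spec_find_lowercase_range s out) := by unfold Spec_find_lowercase_range; infer_instance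

-- ===== CLAIM (what is proved, stated in full; the proofs are below) =====
def Claim_equal_find_lowercase_range : Prop := ∀ (s : String), Dom_find_lowercase_range s → Spec_find_lowercase_range s (find_lowercase_range s)

-- ===== LEMMAS AND PROOFS =====
theorem pv_lower_not_upper (c : Char) (h : PySem.Chars.islower c = true) :
    PySem.Chars.isupper c = false := by
  simp only [PySem.Chars.islower, PySem.Chars.isupper, Bool.and_eq_true, decide_eq_true_eq,
    Bool.and_eq_false_iff, decide_eq_false_iff_not, Char.le_def, UInt32.le_iff_toNat_le] at *
  have e1 : ('a' : Char).val.toNat = 97 := rfl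
  have e2 : ('z' : Char).val.toNat = 122 := rfl
  have e3 : ('A' : Char).val.toNat = 65 := rfl
  have e4 : ('Z' : Char).val.toNat = 90 := rfl
  omega

-- the common characterization: end index given start position k
def pvEndOf (l : List Char) (i : Int) (k : Nat) : Int :=
  match (l.drop k).findIdx? PySem.Chars.isupper with
  | none => i + l.length
  | some m => i + (k : Int) + (m : Int)

def pvBest (l : List Char) (i : Int) : Option (Int × Int) :=
  match l.findIdx? PySem.Chars.islower with
  | none => none
  | some k => some (i + (k : Int), pvEndOf l i k)

def pvFU (l : List Char) (i : Int) : Int :=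
  match l.findIdx? PySem.Chars.isupper with
  | none => i + l.length
  | some k => i + (k : Int)

theorem pvGoA_some (l : List Char) (len i st : Int) :
    pvGoA l len i (some st) =
      (some st, some (match l.findIdx? PySem.Chars.isupper with
        | none => len
        | some k => i + (k : Int))) := by
  induction l generalizing i with
  | nil => simp [pvGoA]
  | cons c rest ih =>
    by_cases hu : PySem.Chars.isupper c = true
    · simp [pvGoA, hu, List.findIdx?_cons]
    · simp only [pvGoA, hu, Bool.and_false, Option.isNone_some, if_false,
        Bool.false_eq_true]
      rw [ih]
      simp only [List.findIdx?_cons, hu, if_false, Bool.false_eq_true]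
      cases h : rest.findIdx? PySem.Chars.isupper <;> simp [h] <;> push_cast <;> ring

theorem pvGoA_none (l : List Char) (len i : Int) (hlen : len = i + l.length) :
    pvGoA l len i none =
      match pvBest l i with
      | none => (none, none)
      | some (a, b) => (some a, some b) := by
  induction l generalizing i with
  | nil => simp [pvGoA, pvBest]
  | cons c rest ih =>
    by_cases hl : PySem.Chars.islower c = true
    · have hu := pv_lower_not_upper c hl
      simp only [pvGoA, hl, hu, Option.isNone_none, if_true,
        if_false, Bool.false_eq_true, Option.isSome_some, Bool.and_true]
      rw [pvGoA_some]
      simp only [pvBest, pvEndOf, List.findIdx?_cons, hl, hu, if_true, if_false,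
        Bool.false_eq_true, List.drop_zero]
      cases h : (c :: rest).findIdx? PySem.Chars.isupper with
      | none =>
        simp only [List.findIdx?_cons, hu, if_false, Bool.false_eq_true] at h
        cases h2 : rest.findIdx? PySem.Chars.isupper <;> simp [h2] at h ⊢
        all_goals (subst hlen; simp only [List.length_cons]; push_cast; ring)
      | some m =>
        simp only [List.findIdx?_cons, hu, if_false, Bool.false_eq_true] at h
        cases h2 : rest.findIdx? PySem.Chars.isupper with
        | none => rw [h2] at h; simp at h
        | some v =>
          rw [h2] at h
          simp only [Option.map_some, Option.some.injEq] at h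
          subst h
          simp
          push_cast
          ring
    · simp only [pvGoA, hl, Option.isNone_none, Bool.false_and, if_false,
        Bool.and_false, Option.isSome_none, Bool.false_eq_true]
      rw [ih (i + 1) (by simp [hlen]; push_cast; ring)]
      simp only [pvBest, pvEndOf, List.findIdx?_cons, hl, if_false, Bool.false_eq_true]
      cases h : rest.findIdx? PySem.Chars.islower with
      | none => simp [h]
      | some k =>
        simp only [h, Option.map_some, List.drop_succ_cons]
        cases h2 : (rest.drop k).findIdx? PySem.Chars.isupper <;>
          simp [h2] <;> omega

-- B's fold, rewritten as a foldr, computes (pvBest, pvFU, i)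
theorem pvFoldB (l : List Char) (i : Int) :
    l.foldr (fun c st => pvStepB st c) (none, i + l.length, i + l.length) =
      (pvBest l i, pvFU l i, i) := by
  induction l generalizing i with
  | nil => simp [pvBest, pvFU]
  | cons c rest ih =>
    have hlen : i + ((c :: rest).length : Int) = (i + 1) + (rest.length : Int) := by
      rw [List.length_cons]; push_cast; ring
    simp only [List.foldr_cons, hlen, ih (i + 1)]
    by_cases hu : PySem.Chars.isupper c = true
    · have hl : PySem.Chars.islower c = false := by
        by_contra h
        simp only [Bool.not_eq_false] at h
        exact absurd hu (by simp [pv_lower_not_upper c h])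
      simp only [pvStepB, hu, if_true]
      have e1 : i + 1 - 1 = i := by ring
      simp only [e1]
      refine Prod.ext ?_ (Prod.ext ?_ rfl)
      · simp only [pvBest, pvEndOf, List.findIdx?_cons, hl, if_false, Bool.false_eq_true]
        cases h : rest.findIdx? PySem.Chars.islower with
        | none => simp [h]
        | some k =>
          simp only [h, Option.map_some, List.drop_succ_cons]
          cases h2 : (rest.drop k).findIdx? PySem.Chars.isupper <;>
            simp [h2] <;> omega
      · simp [pvFU, List.findIdx?_cons, hu]
    · simp only [pvStepB, hu, if_false, Bool.false_eq_true]
      have e1 : i + 1 - 1 = i := by ring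
      by_cases hl : PySem.Chars.islower c = true
      · simp only [hl, if_true, e1]
        refine Prod.ext ?_ (Prod.ext ?_ rfl)
        · simp only [pvBest, pvEndOf, pvFU, List.findIdx?_cons, hl, hu, if_true, if_false,
            Bool.false_eq_true, List.drop_zero]
          cases h2 : rest.findIdx? PySem.Chars.isupper <;>
            simp [h2] <;> omega
        · simp only [pvFU, List.findIdx?_cons, hu, if_false, Bool.false_eq_true]
          cases h2 : rest.findIdx? PySem.Chars.isupper <;> simp [h2] <;> omega
      · simp only [hl, if_false, Bool.false_eq_true, e1]
        refine Prod.ext ?_ (Prod.ext ?_ rfl)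
        · simp only [pvBest, pvEndOf, List.findIdx?_cons, hl, if_false, Bool.false_eq_true]
          cases h : rest.findIdx? PySem.Chars.islower with
          | none => simp [h]
          | some k =>
            simp only [h, Option.map_some, List.drop_succ_cons]
            cases h2 : (rest.drop k).findIdx? PySem.Chars.isupper <;>
              simp [h2] <;> omega
        · simp only [pvFU, List.findIdx?_cons, hu, if_false, Bool.false_eq_true]
          cases h2 : rest.findIdx? PySem.Chars.isupper <;> simp [h2] <;> omega

-- ===== VERDICT (by name: the statement is the Claim_ definition above) =====
theorem find_lowercase_range_spec : Claim_equal_find_lowercase_range := by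
  intro s _
  unfold Spec_find_lowercase_range find_lowercase_range find_lowercase_range_alt
  have hlen : PySem.Str.len s = 0 + (s.toList.length : Int) := by
    simp [PySem.Str.len_eq]
  rw [pvGoA_none s.toList (PySem.Str.len s) 0 hlen]
  rw [List.foldl_reverse, hlen, pvFoldB s.toList 0]
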